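-- pv_equiv track=rewrite | github.com/thelawclaw11/python_algo | beta.py | routePairs
-- ===== SOURCE A (Python) =====
-- def routePairs(maxTravelDist, forwardRouteList, returnRouteList):
--     route_sums = []
--
--     for i, n in forwardRouteList:
--         for j, k in returnRouteList:
--             route_sums.append([[i, j], k + n])
--
--     best_sum = 0
--
--     for route, sum in route_sums:
--         if sum <= maxTravelDist:
--             best_sum = max(best_sum, sum)
--
--     result = []
--
--     for route, sum in route_sums:
--         if sum == best_sum:
--             result.append(route)
--     return result
-- ===== SOURCE B (Python) =====
-- def routePairs(maxTravelDist, forwardRouteList, returnRouteList):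
--     groups = {}
--     for j, k in returnRouteList:
--         groups[k] = groups.get(k, []) + [j]
--     best = 0
--     for _, n in forwardRouteList:
--         for k in groups:
--             s = n + k
--             if best < s <= maxTravelDist:
--                 best = s
--     result = []
--     for i, n in forwardRouteList:
--         for j in groups.get(best - n, []):
--             result.append([i, j])
--     return result
-- ===== Notes on version B (the rewrite author's own statement) =====
-- stated objective: faster
-- what changed: B never materialises the F*R list of route/sum pairs: it groups return routes in a dict keyed by distance, takes the running max over forward routes x distinct return distances, and emits result pairs by a single dict lookup per forward route instead of rescanning all pairs.
import Mathlib
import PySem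

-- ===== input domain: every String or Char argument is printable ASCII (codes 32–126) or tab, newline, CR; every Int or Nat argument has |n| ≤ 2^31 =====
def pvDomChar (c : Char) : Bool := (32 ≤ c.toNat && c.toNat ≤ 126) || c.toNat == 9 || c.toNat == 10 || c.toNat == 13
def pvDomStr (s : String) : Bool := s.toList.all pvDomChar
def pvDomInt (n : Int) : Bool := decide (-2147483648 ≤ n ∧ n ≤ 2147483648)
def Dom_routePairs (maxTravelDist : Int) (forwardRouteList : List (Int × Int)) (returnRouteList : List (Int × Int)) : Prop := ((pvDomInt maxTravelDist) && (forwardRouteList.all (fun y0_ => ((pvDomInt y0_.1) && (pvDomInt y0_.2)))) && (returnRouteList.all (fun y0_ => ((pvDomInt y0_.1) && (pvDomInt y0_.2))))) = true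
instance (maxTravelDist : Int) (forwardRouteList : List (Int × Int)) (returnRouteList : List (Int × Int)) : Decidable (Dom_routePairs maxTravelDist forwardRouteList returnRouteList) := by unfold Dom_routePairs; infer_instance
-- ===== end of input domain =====

-- B groups return routes by distance in a dict and looks the matching distance up per forward route, instead of materialising and rescanning all forward x return pairs (measured faster; return value only).


-- ===== PORT A =====
def routePairs (maxTravelDist : Int) (forwardRouteList : List (Int × Int)) (returnRouteList : List (Int × Int)) : List (List Int) :=
  let route_sums : List (List Int × Int) :=
    forwardRouteList.foldl (fun acc p =>
      returnRouteList.foldl (fun acc2 q => acc2 ++ [([p.1, q.1], q.2 + p.2)]) acc) []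
  let best_sum : Int :=
    route_sums.foldl (fun b rs => if rs.2 ≤ maxTravelDist then max b rs.2 else b) 0
  route_sums.foldl (fun r rs => if rs.2 = best_sum then r ++ [rs.1] else r) []

-- ===== PORT B =====
def routePairs_alt (maxTravelDist : Int) (forwardRouteList : List (Int × Int)) (returnRouteList : List (Int × Int)) : List (List Int) :=
  let groups : PySem.Dict Int (List Int) :=
    returnRouteList.foldl (fun d q => d.modify q.2 [] (fun l => l ++ [q.1])) PySem.Dict.empty
  let best : Int :=
    forwardRouteList.foldl (fun b p =>
      groups.keys.foldl (fun b2 k =>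
        if b2 < p.2 + k ∧ p.2 + k ≤ maxTravelDist then p.2 + k else b2) b) 0
  forwardRouteList.foldl (fun r p =>
    (groups.getD (best - p.2) []).foldl (fun r2 j => r2 ++ [[p.1, j]]) r) []

-- ===== PRECONDITION & SPEC =====
def Spec_routePairs (maxTravelDist : Int) (forwardRouteList : List (Int × Int)) (returnRouteList : List (Int × Int)) (out : List (List Int)) : Prop := out = routePairs_alt maxTravelDist forwardRouteList returnRouteList
instance (maxTravelDist : Int) (forwardRouteList : List (Int × Int)) (returnRouteList : List (Int × Int)) (out : List (List Int)) : Decidable (Spec_routePairs maxTravelDist forwardRouteList returnRouteList out) := by unfold Spec_routePairs; infer_instance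

-- ===== CLAIM (what is proved, stated in full; the proofs are below) =====
def Claim_equal_routePairs : Prop := ∀ (maxTravelDist : Int) (forwardRouteList : List (Int × Int)) (returnRouteList : List (Int × Int)), Dom_routePairs maxTravelDist forwardRouteList returnRouteList → Spec_routePairs maxTravelDist forwardRouteList returnRouteList (routePairs maxTravelDist forwardRouteList returnRouteList)

-- ===== LEMMAS AND PROOFS =====

-- the list of ([i, j], k + n) pairs A materialises
def pvRouteSums (forwardRouteList returnRouteList : List (Int × Int)) : List (List Int × Int) :=
  forwardRouteList.flatMap (fun p => returnRouteList.map (fun q => ([p.1, q.1], q.2 + p.2)))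

lemma pvRouteSums_eq (fwd ret : List (Int × Int)) :
    fwd.foldl (fun acc p =>
      ret.foldl (fun acc2 q => acc2 ++ [([p.1, q.1], q.2 + p.2)]) acc) [] =
    pvRouteSums fwd ret := by
  have h : ∀ (acc : List (List Int × Int)) (p : Int × Int),
      ret.foldl (fun acc2 q => acc2 ++ [([p.1, q.1], q.2 + p.2)]) acc
        = acc ++ ret.map (fun q => ([p.1, q.1], q.2 + p.2)) := by
    intro acc p
    exact PySem.List.foldl_append_singleton_eq_map ..
  calc fwd.foldl (fun acc p =>
        ret.foldl (fun acc2 q => acc2 ++ [([p.1, q.1], q.2 + p.2)]) acc) []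
      = fwd.foldl (fun acc p => acc ++ ret.map (fun q => ([p.1, q.1], q.2 + p.2))) [] := by
        exact PySem.List.foldl_congr_mem fwd _ _ [] (fun acc p _ => h acc p)
    _ = pvRouteSums fwd ret := by
        exact PySem.List.foldl_append_eq_flatMap ..

-- A's running-max step for a fixed forward distance n
def pvBStep (m n : Int) (b k : Int) : Int := if n + k ≤ m then max b (n + k) else b

lemma pvBStep_le (m n b k : Int) : b ≤ pvBStep m n b k := by
  unfold pvBStep; split <;> omega

lemma le_foldl_pvBStep (m n : Int) (l : List Int) (b : Int) : b ≤ l.foldl (pvBStep m n) b := by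
  induction l generalizing b with
  | nil => simp
  | cons x t ih => exact le_trans (pvBStep_le m n b x) (ih _)

lemma mem_le_foldl_pvBStep (m n : Int) (l : List Int) :
    ∀ (b x : Int), x ∈ l → n + x ≤ m → n + x ≤ l.foldl (pvBStep m n) b := by
  induction l with
  | nil => intro b x hx; cases hx
  | cons y t ih =>
    intro b x hx h
    rcases List.mem_cons.1 hx with rfl | hx'
    · refine le_trans ?_ (le_foldl_pvBStep m n t (pvBStep m n b x))
      unfold pvBStep; split <;> omega
    · exact ih _ x hx' h

lemma pvBStep_absorb (m n : Int) (l : List Int) (b x : Int) (hx : x ∈ l) :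
    pvBStep m n (l.foldl (pvBStep m n) b) x = l.foldl (pvBStep m n) b := by
  set F := l.foldl (pvBStep m n) b with hF
  by_cases h : n + x ≤ m
  · have hle := mem_le_foldl_pvBStep m n l b x hx h
    rw [← hF] at hle
    simp only [pvBStep, if_pos h]
    exact max_eq_left hle
  · simp only [pvBStep, if_neg h]

-- duplicates do not change a running max: folding over the deduplicated list is the same
lemma foldl_pvBStep_ofList (m n : Int) (l : List Int) (b : Int) :
    (PySem.Set.ofList l).foldl (pvBStep m n) b = l.foldl (pvBStep m n) b := by
  induction l using List.reverseRecOn with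
  | nil => rfl
  | append_singleton t x ih =>
    rw [PySem.Set.ofList_append_singleton, List.foldl_append, List.foldl_cons, List.foldl_nil]
    by_cases hx : x ∈ t
    · rw [PySem.Set.add_of_mem (by simpa [PySem.Set.mem_ofList] using hx), ih]
      exact (pvBStep_absorb m n t b x hx).symm
    · rw [PySem.Set.add_of_not_mem (by simpa [PySem.Set.mem_ofList] using hx),
        List.foldl_append, ih, List.foldl_cons, List.foldl_nil]

-- the two best-sum loops compute the same value
lemma pvBest_eq (m : Int) (fwd ret : List (Int × Int)) :
    (pvRouteSums fwd ret).foldl (fun b rs => if rs.2 ≤ m then max b rs.2 else b) 0 =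
    fwd.foldl (fun b p =>
      (PySem.Set.ofList (ret.map (fun q => q.2))).foldl (fun b2 k =>
        if b2 < p.2 + k ∧ p.2 + k ≤ m then p.2 + k else b2) b) 0 := by
  unfold pvRouteSums
  rw [List.foldl_flatMap]
  congr 1
  funext b p
  have h1 : (fun (b2 k : Int) => if b2 < p.2 + k ∧ p.2 + k ≤ m then p.2 + k else b2)
      = pvBStep m p.2 := by
    funext b2 k; unfold pvBStep; split_ifs <;> omega
  rw [h1, foldl_pvBStep_ofList, List.foldl_map, List.foldl_map]
  congr 1
  funext b2 q
  unfold pvBStep; split_ifs <;> omega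

-- the dict built by B holds, for each distance c, the js of the return routes with that distance
lemma pvGroups_getD (ret : List (Int × Int)) (c : Int) :
    (ret.foldl (fun d q => d.modify q.2 [] (fun l => l ++ [q.1])) PySem.Dict.empty).getD c []
      = (ret.filter (fun q => q.2 == c)).map (fun q => q.1) := by
  have h : ret.foldl (fun d q => d.modify q.2 [] (fun l => l ++ [q.1])) PySem.Dict.empty
      = (ret.map (fun q => (q.2, q.1))).foldl
          (fun d p => d.modify p.1 [] (fun l => l ++ [p.2])) PySem.Dict.empty := by
    rw [List.foldl_map]
  rw [h, PySem.Dict.getD_foldl_modify_append]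
  simp [List.filter_map, List.map_map, Function.comp_def]

lemma pvGroups_keys (ret : List (Int × Int)) :
    (ret.foldl (fun d q => d.modify q.2 [] (fun l => l ++ [q.1])) PySem.Dict.empty).keys
      = PySem.Set.ofList (ret.map (fun q => q.2)) := by
  rw [PySem.Dict.keys_foldl_modify_key (key := fun q : Int × Int => q.2)
    (f := fun _ q => (fun l => l ++ [q.1]))]
  simp [PySem.Dict.keys, PySem.Dict.empty, PySem.Set.update_nil_left]

-- ===== VERDICT (by name: the statement is the Claim_ definition above) =====
theorem routePairs_spec : Claim_equal_routePairs := by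
  intro m fwd ret _
  unfold Spec_routePairs routePairs routePairs_alt
  simp only [pvRouteSums_eq, pvGroups_getD, pvGroups_keys, ← pvBest_eq]
  generalize (pvRouteSums fwd ret).foldl (fun b rs => if rs.2 ≤ m then max b rs.2 else b) 0 = B
  rw [PySem.List.foldl_append_ite (p := fun rs : List Int × Int => rs.2 = B) (f := fun rs => rs.1)]
  simp only [PySem.List.foldl_append_singleton_eq_map]
  rw [PySem.List.foldl_append_eq_flatMap
    (g := fun p : Int × Int => ((ret.filter (fun q => q.2 == B - p.2)).map (fun q => q.1)).map (fun j => [p.1, j]))]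
  unfold pvRouteSums
  rw [List.nil_append, List.nil_append, List.filter_flatMap, List.map_flatMap]
  congr 1
  funext p
  rw [List.filter_map, List.map_map, List.map_map]
  rw [List.filter_congr (q := fun q : Int × Int => q.2 == B - p.2) ?_]
  · rfl
  · intro q _
    simp only [Function.comp_apply]
    rw [Bool.eq_iff_iff]
    simp only [decide_eq_true_eq, beq_iff_eq]
    omega
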